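-- pv_equiv track=rewrite | github.com/junxiaogit/wecom-ai-platform | scripts/match_group_chats.py | _pick_id_column
-- ===== SOURCE A (Python) =====
-- def _pick_id_column(columns: list[str]) -> str | None:
--     priority = [
--         "roomid",
--         "room_id",
--         "chat_id",
--         "group_id",
--         "id",
--     ]
--     lower_map = {c.lower(): c for c in columns}
--     for p in priority:
--         if p in lower_map:
--             return lower_map[p]
--     return None
-- ===== SOURCE B (Python) =====
-- def _pick_id_column(columns: list[str]) -> str | None:
--     priority = [
--         "roomid",
--         "room_id",
--         "chat_id",
--         "group_id",
--         "id",
--     ]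
--     # one pass over the columns, keeping the best (lowest-rank, latest) match
--     best = None  # (rank, column)
--     for c in columns:
--         low = c.lower()
--         if low in priority:
--             r = priority.index(low)
--             if best is None or r <= best[0]:
--                 best = (r, c)
--     return None if best is None else best[1]
-- ===== Notes on version B (the rewrite author's own statement) =====
-- stated objective: alternative
-- what changed: Replaces A's build-a-lowercase-dict-then-probe-each-priority strategy by a single pass over the columns keeping a best (rank, column) accumulator, where rank is the priority index of the lowered column and ties/improvements take the later column (matching dict overwrite).
import Mathlib
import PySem

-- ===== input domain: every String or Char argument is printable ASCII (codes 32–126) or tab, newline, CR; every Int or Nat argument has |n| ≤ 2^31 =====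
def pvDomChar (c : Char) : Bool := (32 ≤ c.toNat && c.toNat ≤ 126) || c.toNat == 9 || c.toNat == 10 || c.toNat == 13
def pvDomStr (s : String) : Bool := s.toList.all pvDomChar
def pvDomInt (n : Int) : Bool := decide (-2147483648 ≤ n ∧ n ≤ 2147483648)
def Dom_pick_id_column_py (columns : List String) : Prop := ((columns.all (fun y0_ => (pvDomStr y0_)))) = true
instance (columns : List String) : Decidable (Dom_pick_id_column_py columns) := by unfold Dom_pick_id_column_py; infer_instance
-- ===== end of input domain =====

-- B replaces A's lowercase-dict-plus-priority-probe by a single pass over the columns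
-- keeping a best (rank, column) accumulator (alternative decomposition, same cost).

-- ===== PORT A =====
def pickA_loop (d : PySem.Dict String String) : List String → Option String
  | [] => none
  | p :: ps => if d.contains p then d.get? p else pickA_loop d ps

def pick_id_column_py (columns : List String) : Option String :=
  let priority := ["roomid", "room_id", "chat_id", "group_id", "id"]
  let lower_map := columns.foldl (fun d c => d.insert (PySem.Str.lower c) c) PySem.Dict.empty
  pickA_loop lower_map priority

-- ===== PORT B =====
-- one step of Source B's loop: look the lowered column up in the priority list
-- ('low in priority' + 'priority.index(low)' = PySem.List.index?) and update best
def rankStep (P : List String) (b : Option (Nat × String)) (c : String) : Option (Nat × String) :=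
  match PySem.List.index? P (PySem.Str.lower c) with
  | none => b
  | some r =>
    match b with
    | none => some (r, c)
    | some (r0, _) => if r ≤ r0 then some (r, c) else b

def pick_id_column_py_alt (columns : List String) : Option String :=
  let priority := ["roomid", "room_id", "chat_id", "group_id", "id"]
  match columns.foldl (rankStep priority) none with
  | none => none
  | some (_, c) => some c

-- ===== PRECONDITION & SPEC =====
def Spec_pick_id_column_py (columns : List String) (out : Option String) : Prop := out = pick_id_column_py_alt columns
instance (columns : List String) (out : Option String) : Decidable (Spec_pick_id_column_py columns out) := by unfold Spec_pick_id_column_py; infer_instance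

-- ===== CLAIM (what is proved, stated in full; the proofs are below) =====
def Claim_equal_pick_id_column_py : Prop := ∀ (columns : List String), Dom_pick_id_column_py columns → Spec_pick_id_column_py columns (pick_id_column_py columns)

-- ===== LEMMAS AND PROOFS =====

-- proof-only intermediate: per-priority last-match scan (the two ports are compared through it)
def pickB_scan (p : String) (columns : List String) : Option String :=
  columns.foldl (fun found c => if PySem.Str.lower c == p then some c else found) none

def pickB_loop (columns : List String) : List String → Option String
  | [] => none
  | p :: ps =>
    match pickB_scan p columns with
    | some v => some v
    | none => pickB_loop columns ps

-- ---- A-side: dict lookup = last-match scan ----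
theorem get?_foldl_insert_lower (l : List String) (d : PySem.Dict String String) (p : String) :
    (l.foldl (fun d c => d.insert (PySem.Str.lower c) c) d).get? p
      = l.foldl (fun found c => if PySem.Str.lower c == p then some c else found) (d.get? p) := by
  induction l generalizing d with
  | nil => rfl
  | cons c cs ih =>
    simp only [List.foldl_cons]
    rw [ih]
    congr 1
    rw [PySem.Dict.get?_insert]
    by_cases h : PySem.Str.lower c = p
    · simp [h]
    · simp [h, beq_iff_eq, Ne.symm h]

theorem loopA_eq (columns : List String) (d : PySem.Dict String String)
    (h : ∀ p, d.get? p = pickB_scan p columns) :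
    ∀ ps, pickA_loop d ps = pickB_loop columns ps := by
  intro ps
  induction ps with
  | nil => rfl
  | cons p ps ih =>
    simp only [pickA_loop, pickB_loop]
    rw [PySem.Dict.contains_eq_isSome_get?, h p]
    cases hs : pickB_scan p columns with
    | none => simpa using ih
    | some v => simp

-- ---- B-side: the best-(rank,column) fold = priority-first last-match scan ----

-- how an accumulator for priority list (p :: ps) is built from a p-scan state and a ps-accumulator
def embedE (found : Option String) (b : Option (Nat × String)) : Option (Nat × String) :=
  match found with
  | some v => some (0, v)
  | none => b.map (fun rc => (rc.1 + 1, rc.2))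

theorem rankStep_nil (b : Option (Nat × String)) (c : String) : rankStep [] b c = b := by
  have h : PySem.List.index? ([] : List String) (PySem.Str.lower c) = none := by
    rw [PySem.List.index?_eq_none_iff]; simp
  unfold rankStep
  rw [h]

theorem foldl_rankStep_nil (cs : List String) :
    ∀ b, cs.foldl (rankStep []) b = b := by
  induction cs with
  | nil => intro b; rfl
  | cons c cs ih => intro b; simp only [List.foldl_cons, rankStep_nil]; exact ih b

theorem rankStep_cons (p : String) (ps : List String) (found : Option String)
    (b : Option (Nat × String)) (c : String) :
    rankStep (p :: ps) (embedE found b) c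
      = embedE (if PySem.Str.lower c == p then some c else found) (rankStep ps b c) := by
  by_cases h : PySem.Str.lower c = p
  · have hi : PySem.List.index? (p :: ps) (PySem.Str.lower c) = some 0 := by
      rw [h]; exact PySem.List.index?_cons_self p ps
    unfold rankStep
    rw [hi]
    cases found with
    | some v => simp [embedE, h]
    | none =>
      cases b with
      | none => cases PySem.List.index? ps (PySem.Str.lower c) <;> simp [embedE, h]
      | some rc => cases PySem.List.index? ps (PySem.Str.lower c) <;> simp [embedE, h]
  · have hi : PySem.List.index? (p :: ps) (PySem.Str.lower c)
        = (PySem.List.index? ps (PySem.Str.lower c)).map (· + 1) :=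
      PySem.List.index?_cons_of_ne ps (Ne.symm h)
    have hbeq : (PySem.Str.lower c == p) = false := by simp [h]
    unfold rankStep
    rw [hi]
    cases hr : PySem.List.index? ps (PySem.Str.lower c) with
    | none => simp [hbeq, embedE]
    | some r =>
      cases found with
      | some v => simp [hbeq, embedE]
      | none =>
        cases b with
        | none => simp [hbeq, embedE]
        | some rc =>
          by_cases hle : r ≤ rc.1
          · simp [hbeq, embedE, hle, Nat.succ_le_succ hle]
          · have h2 : ¬ r + 1 ≤ rc.1 + 1 := by omega
            simp [hbeq, embedE, hle, h2]

theorem foldl_rankStep_cons (p : String) (ps : List String) (cs : List String) :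
    ∀ (found : Option String) (b : Option (Nat × String)),
      cs.foldl (rankStep (p :: ps)) (embedE found b)
        = embedE (cs.foldl (fun found c => if PySem.Str.lower c == p then some c else found) found)
                 (cs.foldl (rankStep ps) b) := by
  induction cs with
  | nil => intro found b; rfl
  | cons c cs ih =>
    intro found b
    simp only [List.foldl_cons]
    rw [rankStep_cons]
    exact ih _ _

theorem map_snd_embedE (found : Option String) (b : Option (Nat × String)) :
    (embedE found b).map Prod.snd = match found with
      | some v => some v
      | none => b.map Prod.snd := by
  cases found with
  | some v => rfl
  | none => cases b <;> rfl

theorem foldl_rankStep_eq_loop (cs : List String) :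
    ∀ P, (cs.foldl (rankStep P) none).map Prod.snd = pickB_loop cs P := by
  intro P
  induction P with
  | nil => rw [foldl_rankStep_nil]; rfl
  | cons p ps ih =>
    have hembed : (none : Option (Nat × String)) = embedE none none := rfl
    rw [hembed, foldl_rankStep_cons, map_snd_embedE]
    simp only [pickB_loop, pickB_scan]
    cases hs : cs.foldl (fun found c => if PySem.Str.lower c == p then some c else found)
        (none : Option String) with
    | some v => rfl
    | none => exact ih

theorem alt_eq_loop (columns : List String) :
    pick_id_column_py_alt columns
      = pickB_loop columns ["roomid", "room_id", "chat_id", "group_id", "id"] := by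
  rw [← foldl_rankStep_eq_loop]
  unfold pick_id_column_py_alt
  cases h : columns.foldl (rankStep ["roomid", "room_id", "chat_id", "group_id", "id"]) none with
  | none => simp [h]
  | some rc => simp [h]

-- ===== VERDICT (by name: the statement is the Claim_ definition above) =====
theorem pick_id_column_py_spec : Claim_equal_pick_id_column_py := by
  intro columns _
  unfold Spec_pick_id_column_py pick_id_column_py
  rw [alt_eq_loop]
  exact loopA_eq columns _ (fun p => by
    rw [get?_foldl_insert_lower, PySem.Dict.get?_empty]; rfl) _
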